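-- pv_equiv track=rewrite | github.com/artkoder/cat-weather-new | caption_gen.py | _limit_postcard_hashtags
-- ===== SOURCE A (Python) =====
-- POSTCARD_HASHTAG_LIMIT = 7
--
-- def _limit_postcard_hashtags(tags: list[str], required_keys: set[str]) -> list[str]:
--     if len(tags) <= POSTCARD_HASHTAG_LIMIT:
--         return tags
--     limited: list[str] = []
--     optional_indices: list[int] = []
--     present_required: set[str] = set()
--     for tag in tags:
--         key = tag.casefold()
--         is_required = key in required_keys
--         if len(limited) < POSTCARD_HASHTAG_LIMIT:
--             limited.append(tag)
--             if is_required: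
--                 present_required.add(key)
--             else:
--                 optional_indices.append(len(limited) - 1)
--             continue
--         if is_required and key not in present_required and optional_indices:
--             replace_index = optional_indices.pop()
--             limited[replace_index] = tag
--             present_required.add(key)
--     return limited
-- ===== SOURCE B (Python) =====
-- POSTCARD_HASHTAG_LIMIT = 7
--
-- def _limit_postcard_hashtags(tags: list[str], required_keys: set[str]) -> list[str]:
--     if len(tags) <= POSTCARD_HASHTAG_LIMIT:
--         return tags
--     head = tags[:POSTCARD_HASHTAG_LIMIT]
--     seen = {t.casefold() for t in head if t.casefold() in required_keys}
--     queue = []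
--     for tag in tags[POSTCARD_HASHTAG_LIMIT:]:
--         key = tag.casefold()
--         if key in required_keys and key not in seen:
--             seen.add(key)
--             queue.append(tag)
--     out = []
--     for tag in reversed(head):
--         if queue and tag.casefold() not in required_keys:
--             out.append(queue.pop(0))
--         else:
--             out.append(tag)
--     out.reverse()
--     return out
-- ===== Notes on version B (the rewrite author's own statement) =====
-- stated objective: alternative
-- what changed: A tracks optional slot positions in a mutable index stack and overwrites limited[i] in place during its single scan; B never computes or stores an index: it gathers the missing required tail tags into a FIFO queue and then rebuilds the output back-to-front by one reverse scan of the head that consumes the queue at each non-required tag.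
import Mathlib
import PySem

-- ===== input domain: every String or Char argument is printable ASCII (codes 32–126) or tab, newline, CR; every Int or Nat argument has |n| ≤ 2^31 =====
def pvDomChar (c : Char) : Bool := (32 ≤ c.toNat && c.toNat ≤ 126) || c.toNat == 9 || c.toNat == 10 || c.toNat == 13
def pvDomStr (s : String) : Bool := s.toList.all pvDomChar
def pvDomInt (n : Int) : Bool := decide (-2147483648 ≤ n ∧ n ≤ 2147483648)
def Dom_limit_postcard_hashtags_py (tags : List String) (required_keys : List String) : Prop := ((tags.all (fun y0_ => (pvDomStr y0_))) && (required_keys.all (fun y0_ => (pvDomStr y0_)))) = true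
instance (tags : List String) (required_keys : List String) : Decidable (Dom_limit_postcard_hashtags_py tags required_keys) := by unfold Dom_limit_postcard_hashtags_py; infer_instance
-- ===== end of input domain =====

-- B replaces A's index bookkeeping (mutable optional-index stack, in-place limited[i] = tag) by an
-- index-free rebuild: gather the missing required tail tags into a FIFO queue, then build the output
-- back-to-front by one reverse scan of the head that consumes the queue. Objective: alternative.
-- Neither program mutates its arguments (B copies the head slice; the short branch returns tags itself).

-- ===== PORT A =====
-- body of A's 'for tag in tags' loop; state = (limited, optional_indices, present_required)
def pvStepA (required_keys : List String)
    (s : List String × List Int × PySem.Set String) (tag : String) :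
    List String × List Int × PySem.Set String :=
  let key := PySem.Str.lower tag   -- tag.casefold(); exact on the ASCII domain (no non-ASCII casefold cases)
  let isReq := required_keys.contains key
  if s.1.length < 7 then
    if isReq then (s.1 ++ [tag], s.2.1, s.2.2.add key)
    else (s.1 ++ [tag], s.2.1 ++ [(s.1.length : Int)], s.2.2)
  else if isReq && !(s.2.2.contains key) && !s.2.1.isEmpty then
    -- optional_indices.pop(); the stored indices are nonnegative by construction, so .toNat is exact
    (s.1.set (s.2.1.getLastD 0).toNat tag, s.2.1.dropLast, s.2.2.add key)
  else s

def limit_postcard_hashtags_py (tags : List String) (required_keys : List String) : List String :=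
  if tags.length ≤ 7 then tags
  else (tags.foldl (pvStepA required_keys) ([], [], PySem.Set.empty)).1

-- ===== PORT B =====
-- body of B's 'for tag in tags[7:]' gathering loop; state = (seen, queue)
def pvGatherB (required_keys : List String)
    (s : PySem.Set String × List String) (tag : String) :
    PySem.Set String × List String :=
  let key := PySem.Str.lower tag   -- tag.casefold(); exact on the ASCII domain
  if required_keys.contains key && !(s.1.contains key) then (s.1.add key, s.2 ++ [tag]) else s

-- body of B's 'for tag in reversed(head)' loop; state = (queue, out)
def pvPlaceB (required_keys : List String)
    (s : List String × List String) (tag : String) : List String × List String :=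
  match s.1 with
  | q :: qs =>
    if !(required_keys.contains (PySem.Str.lower tag)) then (qs, s.2 ++ [q])
    else (q :: qs, s.2 ++ [tag])
  | [] => ([], s.2 ++ [tag])

def limit_postcard_hashtags_py_alt (tags : List String) (required_keys : List String) : List String :=
  if tags.length ≤ 7 then tags
  else
    let head := tags.take 7
    let seen := PySem.Set.ofList (head.filterMap (fun t =>
      let k := PySem.Str.lower t
      if required_keys.contains k then some k else none))
    let queue := ((tags.drop 7).foldl (pvGatherB required_keys) (seen, [])).2
    ((head.reverse.foldl (pvPlaceB required_keys) (queue, [])).2).reverse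

-- ===== PRECONDITION & SPEC =====
def Spec_limit_postcard_hashtags_py (tags : List String) (required_keys : List String) (out : List String) : Prop := out = limit_postcard_hashtags_py_alt tags required_keys
instance (tags : List String) (required_keys : List String) (out : List String) : Decidable (Spec_limit_postcard_hashtags_py tags required_keys out) := by unfold Spec_limit_postcard_hashtags_py; infer_instance

-- ===== CLAIM (what is proved, stated in full; the proofs are below) =====
def Claim_equal_limit_postcard_hashtags_py : Prop := ∀ (tags : List String) (required_keys : List String), Dom_limit_postcard_hashtags_py tags required_keys → Spec_limit_postcard_hashtags_py tags required_keys (limit_postcard_hashtags_py tags required_keys)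

-- ===== LEMMAS AND PROOFS =====

-- the ascending list of optional (non-required) indices of a list, as A's head phase records them
def pvOptIdx (required_keys : List String) (l : List String) : List Int :=
  (PySem.List.enumerate l).filterMap (fun p =>
    if required_keys.contains (PySem.Str.lower p.2) then none else some p.1)

-- Head phase: while limited has room for the whole chunk, A's fold appends the chunk,
-- records the non-required indices (shifted by the current length) and adds the required keys.
theorem pv_head_phase (required_keys : List String) (ts : List String) :
    ∀ (acc : List String) (opt : List Int) (pres : PySem.Set String),
      acc.length + ts.length ≤ 7 →
      ts.foldl (pvStepA required_keys) (acc, opt, pres) =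
        (acc ++ ts,
         opt ++ (PySem.List.enumerate ts (acc.length : Int)).filterMap (fun p =>
           if required_keys.contains (PySem.Str.lower p.2) then none else some p.1),
         (ts.filterMap (fun t =>
           let k := PySem.Str.lower t
           if required_keys.contains k then some k else none)).foldl PySem.Set.add pres) := by
  induction ts with
  | nil => intro acc opt pres _; simp [PySem.List.enumerate_nil]
  | cons t rest ih =>
    intro acc opt pres h
    have hlt : acc.length < 7 := by simp at h; omega
    by_cases hreq : PySem.Str.lower t ∈ required_keys
    · rw [List.foldl_cons]
      have hstep : pvStepA required_keys (acc, opt, pres) t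
          = (acc ++ [t], opt, pres.add (PySem.Str.lower t)) := by
        simp [pvStepA, hlt, hreq]
      rw [hstep, ih (acc ++ [t]) opt (pres.add (PySem.Str.lower t)) (by simp at h ⊢; omega)]
      simp [PySem.List.enumerate_cons, hreq, List.append_assoc]
    · rw [List.foldl_cons]
      have hstep : pvStepA required_keys (acc, opt, pres) t
          = (acc ++ [t], opt ++ [(acc.length : Int)], pres) := by
        simp [pvStepA, hlt, hreq]
      rw [hstep, ih (acc ++ [t]) (opt ++ [(acc.length : Int)]) pres (by simp at h ⊢; omega)]
      simp [PySem.List.enumerate_cons, hreq, List.append_assoc]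

-- appended-accumulator form of the gathering fold
theorem pv_gather_acc (required_keys : List String) (rest : List String) :
    ∀ (pres : PySem.Set String) (acc : List String),
      (rest.foldl (pvGatherB required_keys) (pres, acc)).2
        = acc ++ (rest.foldl (pvGatherB required_keys) (pres, [])).2 := by
  induction rest with
  | nil => intro pres acc; simp
  | cons t rest ih =>
    intro pres acc
    by_cases hc : (required_keys.contains (PySem.Str.lower t) && !(pres.contains (PySem.Str.lower t))) = true
    · simp only [List.foldl_cons, pvGatherB, hc, if_true]
      rw [ih _ (acc ++ [t]), ih _ ([] ++ [t])]
      simp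
    · simp only [List.foldl_cons, pvGatherB, if_neg hc]
      exact ih pres acc

-- with an empty optional stack A's tail loop never changes limited
theorem pv_tail_opt_nil (required_keys : List String) (rest : List String) :
    ∀ (limited : List String) (pres : PySem.Set String),
      7 ≤ limited.length →
      rest.foldl (pvStepA required_keys) (limited, [], pres) = (limited, [], pres) := by
  induction rest with
  | nil => intro limited pres _; rfl
  | cons t rest ih =>
    intro limited pres h
    have h7 : ¬ limited.length < 7 := by omega
    have hstepA : pvStepA required_keys (limited, [], pres) t = (limited, [], pres) := by
      simp [pvStepA, h7]
    rw [List.foldl_cons, hstepA, ih limited pres h]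

-- Tail phase: once limited is full, A's replace-from-the-right loop computes exactly
-- "collect the missing required tags, then write them at the reversed optional indices".
theorem pv_tail_phase (required_keys : List String) (rest : List String) :
    ∀ (limited : List String) (opt : List Int) (pres : PySem.Set String),
      7 ≤ limited.length →
      (rest.foldl (pvStepA required_keys) (limited, opt, pres)).1 =
        (opt.reverse.zip ((rest.foldl (pvGatherB required_keys) (pres, [])).2)).foldl
          (fun h p => h.set p.1.toNat p.2) limited := by
  induction rest with
  | nil => intro limited opt pres _; simp
  | cons t rest ih =>
    intro limited opt pres h
    have h7 : ¬ limited.length < 7 := by omega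
    by_cases hc : (required_keys.contains (PySem.Str.lower t)
        && !(pres.contains (PySem.Str.lower t))) = true
    · cases hop : opt.isEmpty
      · -- optional stack nonempty: A replaces its last slot, B records the tag as missing
        have hne : opt ≠ [] := by simpa [List.isEmpty_iff] using hop
        have hstepA : pvStepA required_keys (limited, opt, pres) t =
            (limited.set (opt.getLastD 0).toNat t, opt.dropLast,
              pres.add (PySem.Str.lower t)) := by
          simp only [pvStepA, if_neg h7]
          rw [if_pos (by simp [hop] at *; tauto)]
        have hstepB : pvGatherB required_keys (pres, ([] : List String)) t =
            (pres.add (PySem.Str.lower t), [t]) := by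
          simp only [pvGatherB, if_pos hc]; rfl
        have hrev : opt.reverse = opt.getLastD 0 :: opt.dropLast.reverse := by
          conv_lhs => rw [← List.dropLast_append_getLast hne]
          simp [List.getLastD_eq_getLast?, List.getLast?_eq_some_getLast hne]
        rw [List.foldl_cons, hstepA, List.foldl_cons, hstepB,
          pv_gather_acc required_keys rest (pres.add (PySem.Str.lower t)) [t], hrev]
        simp only [List.singleton_append, List.zip_cons_cons, List.foldl_cons]
        exact ih _ _ _ (by simpa using h)
      · -- optional stack empty: A skips forever, B's gathered tags are never written back
        have hop' : opt = [] := by simpa [List.isEmpty_iff] using hop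
        have hstepA : pvStepA required_keys (limited, opt, pres) t = (limited, opt, pres) := by
          simp [pvStepA, h7, hop']
        rw [List.foldl_cons, hstepA, hop']
        rw [pv_tail_opt_nil required_keys rest limited pres h]
        simp
    · have hstepA : pvStepA required_keys (limited, opt, pres) t = (limited, opt, pres) := by
        simp only [pvStepA, if_neg h7]
        rw [if_neg (by simp at hc ⊢; intro h1 h2; exact absurd (hc h1) (by simp [h2]))]
      have hstepB : pvGatherB required_keys (pres, ([] : List String)) t = (pres, []) := by
        simp only [pvGatherB, if_neg hc]
      rw [List.foldl_cons, hstepA, List.foldl_cons, hstepB]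
      exact ih _ _ _ h

-- appended-accumulator form of B's placing fold (queue component independent of the accumulator)
theorem pv_place_acc (required_keys : List String) (xs : List String) :
    ∀ (q acc : List String),
      xs.foldl (pvPlaceB required_keys) (q, acc)
        = ((xs.foldl (pvPlaceB required_keys) (q, [])).1,
           acc ++ (xs.foldl (pvPlaceB required_keys) (q, [])).2) := by
  induction xs with
  | nil => intro q acc; simp
  | cons t rest ih =>
    intro q acc
    match q with
    | [] =>
      simp only [List.foldl_cons, pvPlaceB]
      rw [ih [] (acc ++ [t]), ih [] ([] ++ [t])]
      simp
    | m :: ms =>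
      by_cases hreq : required_keys.contains (PySem.Str.lower t) = true
      · simp only [List.foldl_cons, pvPlaceB, hreq, Bool.not_true, Bool.false_eq_true,
          if_false]
        rw [ih (m :: ms) (acc ++ [t]), ih (m :: ms) ([] ++ [t])]
        simp
      · simp only [List.foldl_cons, pvPlaceB, eq_false_of_ne_true hreq,
          Bool.not_false, if_true]
        rw [ih ms (acc ++ [m]), ih ms ([] ++ [m])]
        simp

-- with an empty queue the placing fold just copies its input
theorem pv_place_nil (required_keys : List String) (xs : List String) :
    ∀ (acc : List String),
      xs.foldl (pvPlaceB required_keys) ([], acc) = ([], acc ++ xs) := by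
  induction xs with
  | nil => intro acc; simp
  | cons t rest ih =>
    intro acc
    simp only [List.foldl_cons, pvPlaceB]
    rw [ih (acc ++ [t])]
    simp

-- every optional index is a nonnegative in-range position
theorem pv_optIdx_bound (required_keys : List String) (l : List String) :
    ∀ i ∈ pvOptIdx required_keys l, 0 ≤ i ∧ i.toNat < l.length := by
  intro i hi
  simp only [pvOptIdx, List.mem_filterMap] at hi
  obtain ⟨p, hp, hif⟩ := hi
  rw [PySem.List.mem_enumerate_iff] at hp
  obtain ⟨k, hk, rfl⟩ := hp
  split at hif
  · exact absurd hif (by simp)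
  · cases hif
    refine ⟨by omega, by simp; omega⟩

-- writing at in-range positions commutes with appending one element on the right
theorem pv_zipset_append (pairs : List (Int × String)) :
    ∀ (l : List String) (x : String),
      (∀ p ∈ pairs, 0 ≤ p.1 ∧ p.1.toNat < l.length) →
      pairs.foldl (fun h p => h.set p.1.toNat p.2) (l ++ [x])
        = pairs.foldl (fun h p => h.set p.1.toNat p.2) l ++ [x] := by
  induction pairs with
  | nil => intro l x _; rfl
  | cons p rest ih =>
    intro l x hb
    have hp := hb p (List.mem_cons_self ..)
    simp only [List.foldl_cons]
    rw [List.set_append_left _ _ hp.2, ih (l.set p.1.toNat p.2) x (by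
      intro q hq
      have := hb q (List.mem_cons_of_mem _ hq)
      simpa using this)]
-- Bridge: writing the queue at the reversed optional indices is exactly B's back-to-front rebuild.
theorem pv_bridge (required_keys : List String) (l : List String) :
    ∀ (q : List String),
      ((pvOptIdx required_keys l).reverse.zip q).foldl
          (fun h p => h.set p.1.toNat p.2) l
        = ((l.reverse.foldl (pvPlaceB required_keys) (q, [])).2).reverse := by
  induction l using List.reverseRecOn with
  | nil => intro q; simp [pvOptIdx, PySem.List.enumerate_nil]
  | append_singleton l' a ih =>
    intro q
    have henum : pvOptIdx required_keys (l' ++ [a])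
        = pvOptIdx required_keys l'
          ++ (if required_keys.contains (PySem.Str.lower a) then []
              else [((l'.length : Int))]) := by
      by_cases h : PySem.Str.lower a ∈ required_keys <;>
        simp [pvOptIdx, PySem.List.enumerate_append, PySem.List.enumerate_cons,
          PySem.List.enumerate_nil, h]
    by_cases hreq : required_keys.contains (PySem.Str.lower a) = true
    · -- a is required: kept on both sides
      have hreq' : PySem.Str.lower a ∈ required_keys := by simpa using hreq
      have hstep : pvPlaceB required_keys (q, []) a = (q, [a]) := by
        match q with
        | [] => rfl
        | m :: ms => simp [pvPlaceB, hreq']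
      rw [henum, if_pos hreq, List.append_nil]
      rw [pv_zipset_append _ l' a (by
        intro p hp
        have h1 := pv_optIdx_bound required_keys l' p.1 (by
          have : p.1 ∈ (pvOptIdx required_keys l').reverse := (List.of_mem_zip hp).1
          simpa using this)
        exact h1)]
      rw [ih q]
      rw [List.reverse_append, List.reverse_singleton, List.singleton_append,
        List.foldl_cons, hstep, pv_place_acc required_keys l'.reverse q [a]]
      simp
    · -- a is optional
      rw [henum, if_neg hreq]
      match q with
      | [] =>
        -- nothing to place
        simp only [List.reverse_append, List.reverse_singleton, List.singleton_append,
          List.foldl_cons]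
        have hstep : pvPlaceB required_keys (([] : List String), ([] : List String)) a
            = ([], [a]) := by rfl
        rw [hstep, pv_place_nil required_keys l'.reverse [a]]
        simp
      | m :: ms =>
        have hreq'' : PySem.Str.lower a ∉ required_keys := by simpa using hreq
        have hstep : pvPlaceB required_keys (m :: ms, []) a = (ms, [m]) := by
          simp [pvPlaceB, hreq'']
        have hset : (l' ++ [a]).set ((l'.length : Int)).toNat m = l' ++ [m] := by
          simp
        simp only [List.reverse_append, List.reverse_singleton, List.singleton_append,
          List.zip_cons_cons, List.foldl_cons]
        rw [hset]
        rw [pv_zipset_append _ l' m (by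
          intro p hp
          exact pv_optIdx_bound required_keys l' p.1 (by
            have : p.1 ∈ (pvOptIdx required_keys l').reverse := (List.of_mem_zip hp).1
            simpa using this))]
        rw [ih ms]
        rw [hstep, pv_place_acc required_keys l'.reverse ms [m]]
        simp

-- ===== VERDICT (by name: the statement is the Claim_ definition above) =====
theorem limit_postcard_hashtags_py_spec : Claim_equal_limit_postcard_hashtags_py := by
  intro tags required_keys _
  unfold Spec_limit_postcard_hashtags_py limit_postcard_hashtags_py limit_postcard_hashtags_py_alt
  by_cases hle : tags.length ≤ 7
  · simp [hle]
  · simp only [if_neg hle]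
    have hlen : (tags.take 7).length = 7 := by
      simp [List.length_take]; omega
    conv_lhs => rw [← List.take_append_drop 7 tags, List.foldl_append]
    rw [pv_head_phase required_keys (tags.take 7) [] [] PySem.Set.empty (by simp [hlen])]
    rw [pv_tail_phase required_keys (tags.drop 7) _ _ _ (by simp [hlen])]
    rw [List.nil_append]
    exact pv_bridge required_keys (tags.take 7) _
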